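-- pv_equiv track=rewrite | github.com/sfeng77/myleetcode | weeklyContest24.py | findcontest
-- ===== SOURCE A (Python) =====
-- def findcontest(n):
--     """
--     :type n: int
--     :rtype: str
--     """
--     mylist = [1]
--     k = 1
--     while(k < n):
--         newlist = []
--         k *= 2
--         for i in mylist:
--             newlist += [i]
--             newlist += [k + 1 - i]
--         mylist = newlist
--     return mylist
-- ===== SOURCE B (Python) =====
-- def findcontest(n):
--     # Compute the final list length L (smallest power of two >= n, at least 1)
--     # and the number of doublings m, then emit each element independently from
--     # its index by recursing on the binary structure of the index.
--     L, m = 1, 0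
--     while L < n:
--         L *= 2
--         m += 1
--
--     def val(mm, p):
--         if mm == 0:
--             return 1
--         v = val(mm - 1, p // 2)
--         return 2 ** mm + 1 - v if p % 2 == 1 else v
--
--     return [val(m, p) for p in range(L)]
-- ===== Notes on version B (the rewrite author's own statement) =====
-- stated objective: alternative
-- what changed: Instead of repeatedly rebuilding the whole list by interleaving each element with its complement (A's level-by-level doubling), B computes the list length once and derives each element independently from the binary digits of its index by a small recursion.
import Mathlib
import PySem

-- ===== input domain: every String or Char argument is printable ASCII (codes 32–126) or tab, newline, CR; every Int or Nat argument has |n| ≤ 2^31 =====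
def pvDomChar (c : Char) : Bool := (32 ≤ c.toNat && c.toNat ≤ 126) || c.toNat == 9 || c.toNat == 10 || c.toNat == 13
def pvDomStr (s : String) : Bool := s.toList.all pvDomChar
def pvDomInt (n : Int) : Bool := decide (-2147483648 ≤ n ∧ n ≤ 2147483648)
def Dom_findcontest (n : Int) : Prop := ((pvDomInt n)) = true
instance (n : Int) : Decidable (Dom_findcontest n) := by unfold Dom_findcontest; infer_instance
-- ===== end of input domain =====

-- B computes each element directly from its index instead of A's level-by-level
-- interleaving; same values, different decomposition (objective: alternative).

-- ===== PORT A =====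
-- inner 'for i in mylist: newlist += [i]; newlist += [k + 1 - i]' (k already doubled = k2)
def aStep (k2 : Int) (mylist : List Int) : List Int :=
  mylist.foldl (fun newlist i => newlist ++ [i] ++ [k2 + 1 - i]) []

-- 'while k < n: k *= 2; …'; the proof argument 0 < k only justifies termination
def aLoop (n : Int) (mylist : List Int) (k : Int) (hk : 0 < k) : List Int :=
  if _h : k < n then aLoop n (aStep (k * 2) mylist) (k * 2) (by omega) else mylist
  termination_by (n - k).toNat
  decreasing_by omega

def findcontest (n : Int) : List Int := aLoop n [1] 1 (by norm_num)

-- ===== PORT B =====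
-- 'while L < n: L *= 2; m += 1' (m kept as a Nat: it counts the doublings)
def bSize (n L : Int) (m : Nat) (hL : 0 < L) : Int × Nat :=
  if _h : L < n then bSize n (L * 2) (m + 1) (by omega) else (L, m)
  termination_by (n - L).toNat
  decreasing_by omega

-- recursive helper 'val(mm, p)'; '//' and '%' are Python's (divisor 2 > 0)
def bVal (mm : Nat) (p : Int) : Int :=
  match mm with
  | 0 => 1
  | t + 1 =>
    let v := bVal t (PySem.Int.floordiv p 2)
    if PySem.Int.mod p 2 = 1 then (2 : Int) ^ (t + 1) + 1 - v else v

def findcontest_alt (n : Int) : List Int :=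
  let r := bSize n 1 0 (by norm_num)
  (PySem.List.pyRange 0 r.1 1).map (fun p => bVal r.2 p)

-- ===== PRECONDITION & SPEC =====
def Spec_findcontest (n : Int) (out : List Int) : Prop := out = findcontest_alt n
instance (n : Int) (out : List Int) : Decidable (Spec_findcontest n out) := by unfold Spec_findcontest; infer_instance

-- ===== CLAIM (what is proved, stated in full; the proofs are below) =====
def Claim_equal_findcontest : Prop := ∀ (n : Int), Dom_findcontest n → Spec_findcontest n (findcontest n)

-- ===== LEMMAS AND PROOFS =====

lemma aStep_eq_flatMap (k2 : Int) (l : List Int) :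
    aStep k2 l = l.flatMap (fun i => [i, k2 + 1 - i]) := by
  unfold aStep
  suffices h : ∀ acc : List Int,
      l.foldl (fun newlist i => newlist ++ [i] ++ [k2 + 1 - i]) acc
        = acc ++ l.flatMap (fun i => [i, k2 + 1 - i]) by
    simpa using h []
  induction l with
  | nil => simp
  | cons x xs ih =>
    intro acc; simp [List.foldl_cons, List.append_assoc, List.flatMap_def]

lemma bVal_even (t : Nat) (q : Nat) :
    bVal (t + 1) ((2 * q : Nat) : Int) = bVal t (q : Int) := by
  have h1 : PySem.Int.mod ((2 * q : Nat) : Int) 2 = 0 := by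
    rw [PySem.Int.mod_eq_emod_of_pos (by norm_num)]; omega
  have h2 : PySem.Int.floordiv ((2 * q : Nat) : Int) 2 = (q : Int) := by
    rw [PySem.Int.floordiv_eq_ediv_of_pos (by norm_num)]; omega
  simp only [bVal]
  rw [h1, h2]
  norm_num

lemma bVal_odd (t : Nat) (q : Nat) :
    bVal (t + 1) ((2 * q + 1 : Nat) : Int) = (2 : Int) ^ (t + 1) + 1 - bVal t (q : Int) := by
  have h1 : PySem.Int.mod ((2 * q + 1 : Nat) : Int) 2 = 1 := by
    rw [PySem.Int.mod_eq_emod_of_pos (by norm_num)]; omega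
  have h2 : PySem.Int.floordiv ((2 * q + 1 : Nat) : Int) 2 = (q : Int) := by
    rw [PySem.Int.floordiv_eq_ediv_of_pos (by norm_num)]; omega
  simp only [bVal]
  rw [h1, h2]
  norm_num

-- one doubling pass of A turns the level-t table into the level-(t+1) table
lemma step_gen (t : Nat) (s : Nat) :
    ((List.range s).map (fun q : Nat => bVal t (q : Int))).flatMap
        (fun i => [i, (2 : Int) ^ (t + 1) + 1 - i])
      = (List.range (2 * s)).map (fun q : Nat => bVal (t + 1) (q : Int)) := by
  induction s with
  | zero => simp
  | succ s ih =>
    have h : 2 * (s + 1) = (2 * s + 1) + 1 := by omega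
    rw [List.range_succ, h, List.range_succ, List.range_succ]
    rw [List.map_append, List.flatMap_append, ih, List.map_append, List.map_append]
    have he := bVal_even t s
    have ho := bVal_odd t s
    simp only [List.map_cons, List.map_nil, List.flatMap_cons, List.flatMap_nil]
    rw [he, ho]
    simp [List.append_assoc]

lemma step_map (t : Nat) :
    aStep ((2 : Int) ^ (t + 1)) ((List.range (2 ^ t)).map (fun q : Nat => bVal t (q : Int)))
      = (List.range (2 ^ (t + 1))).map (fun q : Nat => bVal (t + 1) (q : Int)) := by
  rw [aStep_eq_flatMap]
  have hpow : (2 : Nat) ^ (t + 1) = 2 * 2 ^ t := by ring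
  rw [hpow, step_gen t]

lemma pow_int_nat (t : Nat) : ((2 ^ t : Nat) : Int) = (2 : Int) ^ t := by push_cast; ring

-- main loop invariant: from level t on, A's loop and B's size loop + table agree
lemma loop_eq (n : Int) (fuel : Nat) : ∀ (t : Nat) (hk : (0 : Int) < 2 ^ t),
    fuel = (n - 2 ^ t).toNat →
    aLoop n ((List.range (2 ^ t)).map (fun q : Nat => bVal t (q : Int))) ((2 : Int) ^ t) hk
      = (PySem.List.pyRange 0 (bSize n (2 ^ t) t hk).1 1).map
          (fun p => bVal (bSize n (2 ^ t) t hk).2 p) := by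
  induction fuel using Nat.strong_induction_on with
  | _ fuel ih =>
    intro t hk hfuel
    rw [aLoop, bSize]
    by_cases h : (2 : Int) ^ t < n
    · simp only [h, dif_pos]
      have hmul : (2 : Int) ^ t * 2 = (2 : Int) ^ (t + 1) := by ring
      have hk' : (0 : Int) < 2 ^ (t + 1) := by positivity
      have hdec : (n - 2 ^ (t + 1)).toNat < fuel := by
        have h2 : (2 : Int) ^ t < 2 ^ (t + 1) := by
          have := hk; rw [pow_succ]; omega
        omega
      have := ih _ hdec (t + 1) hk' rfl
      simp only [hmul, step_map t]
      convert this using 3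
    · simp only [h, dif_neg, not_false_iff]
      rw [← pow_int_nat, PySem.List.pyRange_zero_natCast]
      simp

-- ===== VERDICT (by name: the statement is the Claim_ definition above) =====
theorem findcontest_spec : Claim_equal_findcontest := by
  intro n _
  unfold Spec_findcontest findcontest findcontest_alt
  have h := loop_eq n (n - 2 ^ 0).toNat 0 (by norm_num) rfl
  simpa using h
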